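-- pv_equiv track=rewrite | github.com/Alerion/pi_dev_stuff | midi-monitor/midi_monitor.py | _patterns_match
-- ===== SOURCE A (Python) =====
-- def _patterns_match(a, b):
--     """Compare two pattern snapshots."""
--     if set(a.keys()) != set(b.keys()):
--         return False
--     for step in a:
--         notes_a = sorted([(e['note'], e['velocity']) for e in a[step]])
--         notes_b = sorted([(e['note'], e['velocity']) for e in b.get(step, [])])
--         if notes_a != notes_b:
--             return False
--     return True
-- ===== SOURCE B (Python) =====
-- def _patterns_match(a, b):
--     """Compare two pattern snapshots."""
--     if set(a.keys()) != set(b.keys()):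
--         return False
--     ca = {}
--     for step in a:
--         for e in a[step]:
--             t = (step, e['note'], e['velocity'])
--             ca[t] = ca.get(t, 0) + 1
--     cb = {}
--     for step in b:
--         for e in b[step]:
--             t = (step, e['note'], e['velocity'])
--             cb[t] = cb.get(t, 0) + 1
--     return ca == cb
-- ===== Notes on version B (the rewrite author's own statement) =====
-- stated objective: alternative
-- what changed: Replaces the per-step loop that sorts each step's (note, velocity) list and early-returns on the first mismatch with one flat counting table of (step, note, velocity) triples per dict, compared once as multisets.
-- outside the precondition, e.g. on _patterns_match({0: [{'note': 1, 'velocity': 1}], 1: [{}]}, {0: [], 1: []}): A returns False, B raises KeyError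
import Mathlib
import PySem

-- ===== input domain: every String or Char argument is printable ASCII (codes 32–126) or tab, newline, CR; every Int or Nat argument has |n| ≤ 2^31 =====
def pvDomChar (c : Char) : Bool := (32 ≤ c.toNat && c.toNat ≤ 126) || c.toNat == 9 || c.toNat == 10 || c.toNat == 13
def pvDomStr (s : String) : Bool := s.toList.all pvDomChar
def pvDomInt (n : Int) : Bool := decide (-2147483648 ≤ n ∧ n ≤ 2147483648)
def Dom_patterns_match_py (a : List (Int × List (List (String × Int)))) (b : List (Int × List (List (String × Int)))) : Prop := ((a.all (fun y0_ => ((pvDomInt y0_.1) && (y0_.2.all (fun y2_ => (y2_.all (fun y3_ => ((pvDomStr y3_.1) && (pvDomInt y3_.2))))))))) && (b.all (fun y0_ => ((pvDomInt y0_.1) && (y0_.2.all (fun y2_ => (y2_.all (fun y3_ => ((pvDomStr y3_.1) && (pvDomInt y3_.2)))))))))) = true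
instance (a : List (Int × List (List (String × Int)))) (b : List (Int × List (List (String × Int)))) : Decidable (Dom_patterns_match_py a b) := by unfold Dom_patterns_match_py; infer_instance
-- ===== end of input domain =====

-- B replaces A's per-step sort-and-compare loop (early return) by one flat counting table of
-- (step, note, velocity) triples per dict, compared once as multisets (alternative decomposition).


-- ===== PORT A =====
-- e['note'], e['velocity'] on the event dict e; total via getD — exact under Pre_ (both keys present)
def pvEvent (e : List (String × Int)) : Int × Int :=
  ((PySem.Dict.ofList e).getD "note" 0, (PySem.Dict.ofList e).getD "velocity" 0)

-- 'for step in a: … if notes_a != notes_b: return False'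
def pvLoopA (steps : List (Int × List (List (String × Int))))
    (bd : PySem.Dict Int (List (List (String × Int)))) : Bool :=
  match steps with
  | [] => true
  | (s, evs) :: rest =>
      let notesA := PySem.List.sorted2 (evs.map pvEvent) Prod.fst Prod.snd false
      let notesB := PySem.List.sorted2 ((bd.getD s []).map pvEvent) Prod.fst Prod.snd false
      if notesA ≠ notesB then false else pvLoopA rest bd

def patterns_match_py (a : List (Int × List (List (String × Int)))) (b : List (Int × List (List (String × Int)))) : Bool :=
  let da := PySem.Dict.ofList a
  let db := PySem.Dict.ofList b
  if !(PySem.Set.equal (PySem.Set.ofList da.keys) (PySem.Set.ofList db.keys)) then false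
  else pvLoopA da.items db

-- ===== PORT B =====
-- 'for step in d: for e in d[step]: t = (step, e["note"], e["velocity"]); c[t] = c.get(t, 0) + 1'
def pvCountDict (d : PySem.Dict Int (List (List (String × Int)))) : PySem.Dict (Int × Int × Int) Int :=
  d.items.foldl (fun c se =>
    se.2.foldl (fun c e =>
      c.insert (se.1, pvEvent e) (c.getD (se.1, pvEvent e) 0 + 1)) c) PySem.Dict.empty

-- Python's 'ca == cb' on dicts: same key set and the same value at every key
def pvDictValuesEq (ca cb : PySem.Dict (Int × Int × Int) Int) : Bool :=
  PySem.Set.equal (PySem.Set.ofList ca.keys) (PySem.Set.ofList cb.keys) &&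
    ca.items.all (fun kv => cb.get? kv.1 == some kv.2)

def patterns_match_py_alt (a : List (Int × List (List (String × Int)))) (b : List (Int × List (List (String × Int)))) : Bool :=
  let da := PySem.Dict.ofList a
  let db := PySem.Dict.ofList b
  if !(PySem.Set.equal (PySem.Set.ofList da.keys) (PySem.Set.ofList db.keys)) then false
  else pvDictValuesEq (pvCountDict da) (pvCountDict db)

-- ===== PRECONDITION & SPEC =====
-- Pre_ excludes inputs whose key sets agree but where some event dict lacks a "note" or "velocity"
-- key: there Python A raises KeyError (or returns early only by accident of loop order) and B raises.
def Pre_patterns_match_py (a : List (Int × List (List (String × Int)))) (b : List (Int × List (List (String × Int)))) : Prop :=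
  PySem.Set.equal (PySem.Set.ofList (a.map Prod.fst)) (PySem.Set.ofList (b.map Prod.fst)) = false ∨
  (a ++ b).all (fun se => se.2.all (fun e =>
      (e.map Prod.fst).contains "note" && (e.map Prod.fst).contains "velocity")) = true
instance (a : List (Int × List (List (String × Int)))) (b : List (Int × List (List (String × Int)))) : Decidable (Pre_patterns_match_py a b) := by unfold Pre_patterns_match_py; infer_instance

def pvWitness_patterns_match_py : (List (Int × List (List (String × Int)))) × (List (Int × List (List (String × Int)))) :=
  ([(0, [[("note", 60), ("velocity", 100)], [("note", 62), ("velocity", 90)]]), (1, [])],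
   [(1, []), (0, [[("velocity", 90), ("note", 62)], [("note", 60), ("velocity", 100)]])])

def Spec_patterns_match_py (a : List (Int × List (List (String × Int)))) (b : List (Int × List (List (String × Int)))) (out : Bool) : Prop := out = patterns_match_py_alt a b
instance (a : List (Int × List (List (String × Int)))) (b : List (Int × List (List (String × Int)))) (out : Bool) : Decidable (Spec_patterns_match_py a b out) := by unfold Spec_patterns_match_py; infer_instance

-- ===== CLAIM (what is proved, stated in full; the proofs are below) =====
def Claim_equal_patterns_match_py : Prop := ∀ (a : List (Int × List (List (String × Int)))) (b : List (Int × List (List (String × Int)))), Dom_patterns_match_py a b → Pre_patterns_match_py a b → Spec_patterns_match_py a b (patterns_match_py a b)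

-- ===== LEMMAS AND PROOFS =====

-- the triples B counts, read off a dict
def pvTriples (d : PySem.Dict Int (List (List (String × Int)))) : List (Int × Int × Int) :=
  d.items.flatMap (fun se => se.2.map (fun e => (se.1, pvEvent e)))

theorem pv_sorted2_eq_sortedLex (xs : List (Int × Int)) :
    PySem.List.sorted2 xs Prod.fst Prod.snd false
      = PySem.List.sorted xs (fun p => toLex p) false := by
  unfold PySem.List.sorted2 PySem.List.sorted
  have hb : (fun (a b : Int × Int) => decide (a.1 < b.1) || (!decide (b.1 < a.1) && decide (a.2 < b.2)))
      = (fun (a b : Int × Int) => decide (toLex a < toLex b)) := by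
    funext a b
    rcases a with ⟨a1, a2⟩; rcases b with ⟨b1, b2⟩
    by_cases h1 : a1 < b1 <;> by_cases h2 : b1 < a1 <;> by_cases h3 : a2 < b2 <;>
      simp [Prod.Lex.toLex_lt_toLex, h1, h2, h3] <;> omega
  simp only [if_neg (by decide : ¬ (false = true))]
  rw [hb]

theorem pv_sorted2_eq_iff_perm (l1 l2 : List (Int × Int)) :
    (PySem.List.sorted2 l1 Prod.fst Prod.snd false = PySem.List.sorted2 l2 Prod.fst Prod.snd false)
      ↔ l1.Perm l2 := by
  constructor
  · intro h
    exact (PySem.List.sorted2_perm l1 Prod.fst Prod.snd false).symm.trans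
      (h ▸ PySem.List.sorted2_perm l2 Prod.fst Prod.snd false)
  · intro h
    rw [pv_sorted2_eq_sortedLex, pv_sorted2_eq_sortedLex]
    exact PySem.List.sorted_eq_sorted_of_perm l1 l2 _ (fun x y hxy => hxy) h

theorem pvLoopA_eq_true_iff (steps : List (Int × List (List (String × Int))))
    (bd : PySem.Dict Int (List (List (String × Int)))) :
    pvLoopA steps bd = true ↔ ∀ se ∈ steps,
      PySem.List.sorted2 (se.2.map pvEvent) Prod.fst Prod.snd false
        = PySem.List.sorted2 ((bd.getD se.1 []).map pvEvent) Prod.fst Prod.snd false := by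
  induction steps with
  | nil => simp [pvLoopA]
  | cons hd tl ih =>
    rcases hd with ⟨s, evs⟩
    simp only [pvLoopA]
    split_ifs with h
    · simp only [false_iff]
      intro hall
      exact h (hall (s, evs) (List.mem_cons_self ..))
    · rw [not_not] at h
      rw [ih]
      constructor
      · intro hall se hmem
        rcases List.mem_cons.1 hmem with h' | hse
        · rw [h']; exact h
        · exact hall se hse
      · intro hall se hse
        exact hall se (List.mem_cons_of_mem _ hse)

theorem pv_foldl_nest {α : Type} (F : α → (Int × Int × Int) → α)
    (l : List (Int × List (List (String × Int)))) (c0 : α) :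
    l.foldl (fun c se => se.2.foldl (fun c e => F c (se.1, pvEvent e)) c) c0
      = (l.flatMap (fun se => se.2.map (fun e => (se.1, pvEvent e)))).foldl F c0 := by
  induction l generalizing c0 with
  | nil => rfl
  | cons hd tl ih =>
    simp only [List.foldl_cons, List.flatMap_cons, List.foldl_append, List.foldl_map, ih]

theorem pvCountDict_eq_counter (d : PySem.Dict Int (List (List (String × Int)))) :
    pvCountDict d = PySem.Dict.counter (pvTriples d) := by
  rw [← PySem.Dict.foldl_insert_getD_add_one_eq_counter]
  unfold pvCountDict pvTriples
  exact pv_foldl_nest (α := PySem.Dict (Int × Int × Int) Int)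
    (fun c t => c.insert t (c.getD t 0 + 1)) d.items PySem.Dict.empty

theorem pv_count_map_pair (s : Int) (evs : List (List (String × Int))) (p : Int × Int) :
    List.count (s, p) (evs.map (fun e => (s, pvEvent e))) = List.count p (evs.map pvEvent) := by
  induction evs with
  | nil => rfl
  | cons e tl ih => simp [List.count_cons, ih, Prod.ext_iff]

theorem pv_count_flat_zero (l : List (Int × List (List (String × Int)))) (s : Int) (p : Int × Int)
    (hs : s ∉ l.map Prod.fst) :
    List.count (s, p) (l.flatMap (fun se => se.2.map (fun e => (se.1, pvEvent e)))) = 0 := by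
  induction l with
  | nil => rfl
  | cons hd tl ih =>
    simp only [List.map_cons, List.mem_cons, not_or] at hs
    simp only [List.flatMap_cons, List.count_append, ih hs.2, Nat.add_zero]
    apply List.count_eq_zero_of_not_mem
    intro hmem
    rcases List.mem_map.1 hmem with ⟨e, _, he⟩
    exact hs.1 (by rw [← (Prod.ext_iff.1 he.symm).1])

theorem pv_count_flat_mem (l : List (Int × List (List (String × Int)))) (s : Int)
    (evs : List (List (String × Int))) (p : Int × Int)
    (hmem : (s, evs) ∈ l) (hnd : (l.map Prod.fst).Nodup) :
    List.count (s, p) (l.flatMap (fun se => se.2.map (fun e => (se.1, pvEvent e))))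
      = List.count p (evs.map pvEvent) := by
  induction l with
  | nil => cases hmem
  | cons hd tl ih =>
    simp only [List.map_cons, List.nodup_cons] at hnd
    rcases List.mem_cons.1 hmem with rfl | htl
    · simp only [List.flatMap_cons, List.count_append, pv_count_map_pair]
      have h0 : List.count (s, p) (tl.flatMap (fun se => se.2.map (fun e => (se.1, pvEvent e)))) = 0 := by
        apply pv_count_flat_zero
        exact hnd.1
      omega
    · have hne : hd.1 ≠ s := by
        intro h
        apply hnd.1
        rw [h]
        exact List.mem_map.2 ⟨(s, evs), htl, rfl⟩
      simp only [List.flatMap_cons, List.count_append, ih htl hnd.2]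
      have h0 : List.count (s, p) (hd.2.map (fun e => (hd.1, pvEvent e))) = 0 := by
        apply List.count_eq_zero_of_not_mem
        intro hm
        rcases List.mem_map.1 hm with ⟨e, _, he⟩
        exact hne (Prod.ext_iff.1 he).1
      omega

-- count of a triple in pvTriples, via the dict's getD
theorem pv_count_pvTriples (d : PySem.Dict Int (List (List (String × Int)))) (s : Int) (p : Int × Int)
    (hnd : d.keys.Nodup) :
    List.count (s, p) (pvTriples d)
      = if s ∈ d.keys then List.count p ((d.getD s []).map pvEvent) else 0 := by
  by_cases hs : s ∈ d.keys
  · rw [if_pos hs]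
    rcases List.mem_map.1 hs with ⟨se, hse, hfst⟩
    rcases se with ⟨s', evs⟩
    cases hfst
    rw [PySem.Dict.getD_of_mem_items d hse hnd]
    exact pv_count_flat_mem d.items s' evs p hse hnd
  · rw [if_neg hs]
    exact pv_count_flat_zero d.items s p hs

theorem pvDictValuesEq_counter_iff (l1 l2 : List (Int × Int × Int)) :
    pvDictValuesEq (PySem.Dict.counter l1) (PySem.Dict.counter l2) = true ↔ l1.Perm l2 := by
  unfold pvDictValuesEq
  rw [Bool.and_eq_true, PySem.Set.equal_iff, List.perm_iff_count, List.all_eq_true]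
  constructor
  · rintro ⟨hk, hall⟩ t
    by_cases ht : t ∈ l1
    · have hmem : (t, (List.count t l1 : Int)) ∈ (PySem.Dict.counter l1).items := by
        rw [PySem.Dict.items_counter]
        exact List.mem_map.2 ⟨t, (PySem.Set.mem_ofList _ _).2 ht, rfl⟩
      have h2 := hall _ hmem
      rw [beq_iff_eq] at h2
      have h3 : (PySem.Dict.counter l2).getD t 0 = (List.count t l1 : Int) := by
        rw [PySem.Dict.getD_eq_get?_getD, h2]; rfl
      rw [PySem.Dict.getD_counter] at h3
      exact_mod_cast h3.symm
    · have ht2 : t ∉ l2 := by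
        intro h
        apply ht
        have := (hk t).2
        rw [PySem.Set.mem_ofList, PySem.Set.mem_ofList, PySem.Dict.keys_counter,
            PySem.Dict.keys_counter, PySem.Set.mem_ofList, PySem.Set.mem_ofList] at this
        exact this h
      rw [List.count_eq_zero_of_not_mem ht, List.count_eq_zero_of_not_mem ht2]
  · intro hcnt
    have hmemiff : ∀ x, x ∈ l1 ↔ x ∈ l2 := by
      intro x
      rw [← List.count_pos_iff, ← List.count_pos_iff, hcnt x]
    constructor
    · intro x
      rw [PySem.Set.mem_ofList, PySem.Set.mem_ofList, PySem.Dict.keys_counter,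
          PySem.Dict.keys_counter, PySem.Set.mem_ofList, PySem.Set.mem_ofList]
      exact hmemiff x
    · intro kv hkv
      rw [PySem.Dict.items_counter] at hkv
      rcases List.mem_map.1 hkv with ⟨k, hk1, rfl⟩
      rw [PySem.Set.mem_ofList] at hk1
      have hk2 : k ∈ l2 := (hmemiff k).1 hk1
      have hmem2 : (k, (List.count k l2 : Int)) ∈ (PySem.Dict.counter l2).items := by
        rw [PySem.Dict.items_counter]
        exact List.mem_map.2 ⟨k, (PySem.Set.mem_ofList _ _).2 hk2, rfl⟩
      have := PySem.Dict.get?_of_mem_items _ hmem2 (PySem.Dict.nodup_keys_counter l2)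
      simp only [this, hcnt k, beq_iff_eq]

-- the bridge: per-step multiset equality (over a's steps) ↔ flat triple-multiset equality
theorem pv_bridge (da db : PySem.Dict Int (List (List (String × Int))))
    (hnda : da.keys.Nodup) (hndb : db.keys.Nodup)
    (hk : ∀ x, x ∈ da.keys ↔ x ∈ db.keys) :
    (∀ se ∈ da.items, ((se.2.map pvEvent) : List (Int × Int)).Perm ((db.getD se.1 []).map pvEvent))
      ↔ (pvTriples da).Perm (pvTriples db) := by
  constructor
  · intro hstep
    rw [List.perm_iff_count]
    rintro ⟨s, p⟩
    rw [pv_count_pvTriples da s p hnda, pv_count_pvTriples db s p hndb]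
    by_cases hs : s ∈ da.keys
    · rw [if_pos hs, if_pos ((hk s).1 hs)]
      rcases List.mem_map.1 hs with ⟨se, hse, hfst⟩
      rcases se with ⟨s', evs⟩
      cases hfst
      rw [PySem.Dict.getD_of_mem_items da hse hnda]
      exact List.perm_iff_count.1 (hstep _ hse) p
    · rw [if_neg hs, if_neg (fun h => hs ((hk s).2 h))]
  · intro hperm se hse
    rcases se with ⟨s, evs⟩
    rw [List.perm_iff_count]
    intro p
    have hs : s ∈ da.keys := List.mem_map.2 ⟨(s, evs), hse, rfl⟩
    have h1 := pv_count_pvTriples da s p hnda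
    have h2 := pv_count_pvTriples db s p hndb
    rw [if_pos hs, PySem.Dict.getD_of_mem_items da hse hnda] at h1
    rw [if_pos ((hk s).1 hs)] at h2
    rw [← h1, ← h2]
    exact List.perm_iff_count.1 hperm (s, p)

theorem pv_ports_agree (a b : List (Int × List (List (String × Int)))) :
    patterns_match_py a b = patterns_match_py_alt a b := by
  unfold patterns_match_py patterns_match_py_alt
  dsimp only
  cases hg : PySem.Set.equal (PySem.Set.ofList (PySem.Dict.ofList a).keys)
      (PySem.Set.ofList (PySem.Dict.ofList b).keys) with
  | false => rfl
  | true =>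
    rw [Bool.not_true, if_neg (by decide : ¬ (false = true)),
        if_neg (by decide : ¬ (false = true))]
    have hk : ∀ x, x ∈ (PySem.Dict.ofList a).keys ↔ x ∈ (PySem.Dict.ofList b).keys := by
      intro x
      have := (PySem.Set.equal_iff _ _).1 hg x
      rwa [PySem.Set.mem_ofList, PySem.Set.mem_ofList] at this
    rw [Bool.eq_iff_iff]
    rw [pvLoopA_eq_true_iff, pvCountDict_eq_counter, pvCountDict_eq_counter,
        pvDictValuesEq_counter_iff]
    rw [← pv_bridge (PySem.Dict.ofList a) (PySem.Dict.ofList b)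
          (PySem.Dict.nodup_keys_ofList a) (PySem.Dict.nodup_keys_ofList b) hk]
    constructor
    · intro h se hse
      exact (pv_sorted2_eq_iff_perm _ _).1 (h se hse)
    · intro h se hse
      exact (pv_sorted2_eq_iff_perm _ _).2 (h se hse)

-- ===== VERDICT (by name: the statement is the Claim_ definition above) =====
theorem patterns_match_py_spec : Claim_equal_patterns_match_py := by
  intro a b _ _
  unfold Spec_patterns_match_py
  exact pv_ports_agree a b
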